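-- pv_equiv track=rewrite | github.com/pzweuj/practice | python/PaternityIndex/calculate_CPI.py | isMendel_triple
-- ===== SOURCE A (Python) =====
-- def isMendel_triple(alleged_father, mother, child):
--     father_type = alleged_father.split("/")
--     mother_type = mother.split("/")
--
--     typeList = []
--     for f in father_type:
--         for m in mother_type:
--             typeList.append(f + "/" + m)
--             typeList.append(m + "/" + f)
--
--     if child in typeList:
--         return True
--     else:
--         return False
-- ===== SOURCE B (Python) =====
-- def isMendel_triple(alleged_father, mother, child):
--     father_type = alleged_father.split("/")
--     mother_type = mother.split("/")
--     c = child.split("/")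
--     if len(c) != 2:
--         return False
--     a, b = c
--     return (a in father_type and b in mother_type) or (a in mother_type and b in father_type)
-- ===== Notes on version B (the rewrite author's own statement) =====
-- stated objective: simpler
-- what changed: Instead of materialising every ordered father/mother allele pairing string and testing the child against that list, B splits the child itself into two alleles and checks each against the parents' allele lists directly.
import Mathlib
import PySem

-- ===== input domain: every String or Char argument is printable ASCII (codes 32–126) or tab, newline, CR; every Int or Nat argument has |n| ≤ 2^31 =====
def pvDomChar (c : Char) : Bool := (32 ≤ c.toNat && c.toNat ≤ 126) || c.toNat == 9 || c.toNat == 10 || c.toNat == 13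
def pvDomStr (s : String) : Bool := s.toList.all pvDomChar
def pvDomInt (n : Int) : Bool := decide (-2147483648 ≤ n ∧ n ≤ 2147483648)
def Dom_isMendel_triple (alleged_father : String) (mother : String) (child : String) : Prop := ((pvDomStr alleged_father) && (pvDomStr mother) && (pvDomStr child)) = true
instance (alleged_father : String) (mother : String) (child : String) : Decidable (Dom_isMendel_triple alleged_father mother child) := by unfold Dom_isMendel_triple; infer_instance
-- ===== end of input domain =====

-- B replaces A's materialisation of all ordered parent-allele pairing strings with a direct
-- parse of the child into its two alleles and a membership check (objective: simpler).

-- ===== PORT A =====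
-- A: build typeList of all f+"/"+m and m+"/"+f, then test child ∈ typeList.
def isMendel_triple (alleged_father : String) (mother : String) (child : String) : Bool :=
  let father_type := PySem.Chars.splitOn alleged_father.toList ['/']
  let mother_type := PySem.Chars.splitOn mother.toList ['/']
  let typeList := father_type.foldl (fun acc f =>
    mother_type.foldl (fun acc m =>
      acc ++ [f ++ ['/'] ++ m] ++ [m ++ ['/'] ++ f]) acc) []
  if typeList.contains child.toList then true else false

-- ===== PORT B =====
-- B: split the child; exactly two parts, one from each parent (in either order).
def isMendel_triple_alt (alleged_father : String) (mother : String) (child : String) : Bool :=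
  let father_type := PySem.Chars.splitOn alleged_father.toList ['/']
  let mother_type := PySem.Chars.splitOn mother.toList ['/']
  let c := PySem.Chars.splitOn child.toList ['/']
  if c.length ≠ 2 then false
  else match c with
    | [a, b] =>
        (father_type.contains a && mother_type.contains b) ||
          (mother_type.contains a && father_type.contains b)
    | _ => false

-- ===== PRECONDITION & SPEC =====
def Spec_isMendel_triple (alleged_father : String) (mother : String) (child : String) (out : Bool) : Prop := out = isMendel_triple_alt alleged_father mother child
instance (alleged_father : String) (mother : String) (child : String) (out : Bool) : Decidable (Spec_isMendel_triple alleged_father mother child out) := by unfold Spec_isMendel_triple; infer_instance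

-- ===== CLAIM (what is proved, stated in full; the proofs are below) =====
def Claim_equal_isMendel_triple : Prop := ∀ (alleged_father : String) (mother : String) (child : String), Dom_isMendel_triple alleged_father mother child → Spec_isMendel_triple alleged_father mother child (isMendel_triple alleged_father mother child)

-- ===== LEMMAS AND PROOFS =====

/-- Simple structural model of Python's `s.split("/")`. -/
def mySplit : List Char → List (List Char)
  | [] => [[]]
  | c :: rest => if c = '/' then [] :: mySplit rest
                 else (mySplit rest).modifyHead (c :: ·)

theorem mySplit_ne_nil (s : List Char) : mySplit s ≠ [] := by
  induction s with
  | nil => simp [mySplit]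
  | cons c rest ih =>
      simp only [mySplit]
      split
      · simp
      · intro h
        have := congrArg List.length h
        simp [List.length_modifyHead] at this
        exact ih this

theorem go_eq_mySplit : ∀ (fuel : Nat) (l cur : List Char) (acc : List (List Char)),
    l.length < fuel →
    PySem.Chars.splitOn.go ['/'] fuel l cur acc
      = acc.reverse ++ (mySplit l).modifyHead (cur.reverse ++ ·) := by
  intro fuel
  induction fuel with
  | zero => intro l cur acc h; omega
  | succ n ih =>
      intro l cur acc h
      cases l with
      | nil =>
          simp [PySem.Chars.splitOn.go, mySplit]
      | cons c rest =>
          simp only [PySem.Chars.splitOn.go]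
          by_cases hc : c = '/'
          · subst hc
            rw [if_pos (by simp [List.isPrefixOf])]
            simp only [List.length_cons, List.length_nil, List.drop_succ_cons, List.drop_zero]
            rw [ih rest [] (cur.reverse :: acc) (by simp at h ⊢; omega)]
            obtain ⟨p, ps, hps⟩ := List.exists_cons_of_ne_nil (mySplit_ne_nil rest)
            simp [mySplit, hps]
          · rw [if_neg (by simp [List.isPrefixOf]; exact fun h => hc h.symm)]
            rw [ih rest (c :: cur) acc (by simp at h ⊢; omega)]
            obtain ⟨p, ps, hps⟩ := List.exists_cons_of_ne_nil (mySplit_ne_nil rest)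
            simp [mySplit, hc, hps]
  
theorem splitOn_eq_mySplit (s : List Char) : PySem.Chars.splitOn s ['/'] = mySplit s := by
  rw [PySem.Chars.splitOn, go_eq_mySplit (s.length + 1) s [] [] (by omega)]
  obtain ⟨p, ps, hps⟩ := List.exists_cons_of_ne_nil (mySplit_ne_nil s)
  simp [hps]

theorem mySplit_slashfree (s : List Char) : ∀ p ∈ mySplit s, '/' ∉ p := by
  induction s with
  | nil => simp [mySplit]
  | cons c rest ih =>
      intro p hp
      simp only [mySplit] at hp
      by_cases hc : c = '/'
      · rw [if_pos hc] at hp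
        rcases List.mem_cons.mp hp with hp | hp
        · subst hp; simp
        · exact ih p hp
      · rw [if_neg hc] at hp
        obtain ⟨q, qs, hq⟩ := List.exists_cons_of_ne_nil (mySplit_ne_nil rest)
        rw [hq, List.modifyHead_cons] at hp
        rcases List.mem_cons.mp hp with hp | hp
        · subst hp
          intro hm
          rcases List.mem_cons.mp hm with hm | hm
          · exact hc hm.symm
          · exact ih q (hq ▸ List.mem_cons_self) hm
        · exact ih p (hq ▸ List.mem_cons_of_mem q hp)

theorem mySplit_of_slashfree (s : List Char) (h : '/' ∉ s) : mySplit s = [s] := by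
  induction s with
  | nil => simp [mySplit]
  | cons c rest ih =>
      simp only [mySplit]
      rw [if_neg (by intro hc; exact h (by simp [hc]))]
      rw [ih (by intro hm; exact h (by simp [hm]))]
      simp

theorem mySplit_append (a b : List Char) (h : '/' ∉ a) :
    mySplit (a ++ '/' :: b) = a :: mySplit b := by
  induction a with
  | nil => simp [mySplit]
  | cons c rest ih =>
      simp only [List.cons_append, mySplit]
      rw [if_neg (by intro hc; exact h (by simp [hc]))]
      rw [ih (by intro hm; exact h (by simp [hm]))]
      simp

/-- Rejoining the split pieces gives back the string. -/
def myJoin : List (List Char) → List Char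
  | [] => []
  | [p] => p
  | p :: ps => p ++ '/' :: myJoin ps

theorem myJoin_mySplit (s : List Char) : myJoin (mySplit s) = s := by
  induction s with
  | nil => simp [mySplit, myJoin]
  | cons c rest ih =>
      simp only [mySplit]
      obtain ⟨p, ps, hps⟩ := List.exists_cons_of_ne_nil (mySplit_ne_nil rest)
      split
      · rename_i hc
        subst hc
        rw [hps] at ih ⊢
        cases ps <;> simp [myJoin] at ih ⊢ <;> simp [ih]
      · rw [hps] at ih ⊢
        cases ps <;> simp [myJoin] at ih ⊢ <;> simp [ih]

theorem mem_typeList (F M : List (List Char)) (x : List Char) :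
    x ∈ F.foldl (fun acc f => M.foldl (fun acc m =>
        acc ++ [f ++ ['/'] ++ m] ++ [m ++ ['/'] ++ f]) acc) []
      ↔ ∃ f ∈ F, ∃ m ∈ M, x = f ++ '/' :: m ∨ x = m ++ '/' :: f := by
  have inner : ∀ (acc : List (List Char)) (f : List Char),
      M.foldl (fun acc m => acc ++ [f ++ ['/'] ++ m] ++ [m ++ ['/'] ++ f]) acc
        = acc ++ M.flatMap (fun m => [f ++ '/' :: m, m ++ '/' :: f]) := by
    intro acc f
    have hfun : (fun (acc : List (List Char)) m =>
        acc ++ [f ++ ['/'] ++ m] ++ [m ++ ['/'] ++ f])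
        = fun acc m => acc ++ [f ++ '/' :: m, m ++ '/' :: f] := by
      funext acc m; simp
    rw [hfun, PySem.List.foldl_append_eq_flatMap]
  have outer : F.foldl (fun acc f => M.foldl (fun acc m =>
        acc ++ [f ++ ['/'] ++ m] ++ [m ++ ['/'] ++ f]) acc) []
      = F.flatMap (fun f => M.flatMap (fun m => [f ++ '/' :: m, m ++ '/' :: f])) := by
    have h2 : ∀ acc, F.foldl (fun acc f => M.foldl (fun acc m =>
        acc ++ [f ++ ['/'] ++ m] ++ [m ++ ['/'] ++ f]) acc) acc
      = acc ++ F.flatMap (fun f => M.flatMap (fun m => [f ++ '/' :: m, m ++ '/' :: f])) := by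
      intro acc
      rw [show (fun acc f => M.foldl (fun acc m =>
        acc ++ [f ++ ['/'] ++ m] ++ [m ++ ['/'] ++ f]) acc)
        = fun acc f => acc ++ M.flatMap (fun m => [f ++ '/' :: m, m ++ '/' :: f]) from
        funext fun acc => funext fun f => inner acc f]
      exact PySem.List.foldl_append_eq_flatMap ..
    simpa using h2 []
  rw [outer]
  simp only [List.mem_flatMap, List.mem_cons]
  constructor
  · rintro ⟨f, hf, m, hm, h | h | h⟩ <;> exact ⟨f, hf, m, hm, by tauto⟩
  · rintro ⟨f, hf, m, hm, h | h⟩ <;> exact ⟨f, hf, m, hm, by tauto⟩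

-- ===== VERDICT (by name: the statement is the Claim_ definition above) =====
theorem isMendel_triple_spec : Claim_equal_isMendel_triple := by
  intro af mo ch _
  unfold Spec_isMendel_triple isMendel_triple isMendel_triple_alt
  simp only [splitOn_eq_mySplit]
  set F := mySplit af.toList with hF
  set M := mySplit mo.toList with hM
  have hmem := mem_typeList F M ch.toList
  by_cases hc : ch.toList ∈ F.foldl (fun acc f => M.foldl (fun acc m =>
      acc ++ [f ++ ['/'] ++ m] ++ [m ++ ['/'] ++ f]) acc) []
  · -- A returns true; show B returns true
    rw [if_pos (List.elem_eq_true_of_mem hc)]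
    obtain ⟨f, hf, m, hm, hor⟩ := hmem.mp hc
    have hfree_f : '/' ∉ f := mySplit_slashfree _ f hf
    have hfree_m : '/' ∉ m := mySplit_slashfree _ m hm
    rcases hor with h | h
    · have hsplit : mySplit ch.toList = [f, m] := by
        rw [h, mySplit_append f m hfree_f, mySplit_of_slashfree m hfree_m]
      rw [if_neg (by simp [hsplit])]
      simp [hsplit]
      exact Or.inl ⟨hf, hm⟩
    · have hsplit : mySplit ch.toList = [m, f] := by
        rw [h, mySplit_append m f hfree_m, mySplit_of_slashfree f hfree_f]
      rw [if_neg (by simp [hsplit])]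
      simp [hsplit]
      exact Or.inr ⟨hm, hf⟩
  · -- A returns false; show B returns false
    rw [if_neg (by simpa using fun h => hc (List.mem_of_elem_eq_true h))]
    by_cases hlen : (mySplit ch.toList).length ≠ 2
    · rw [if_pos hlen]
    · rw [if_neg hlen]
      obtain ⟨a, b, hab⟩ : ∃ a b, mySplit ch.toList = [a, b] := by
        rw [not_not] at hlen
        match hh : mySplit ch.toList with
        | [a, b] => exact ⟨a, b, rfl⟩
        | [] | [_] | _ :: _ :: _ :: _ => rw [hh] at hlen; simp at hlen
      have hch : ch.toList = a ++ '/' :: b := by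
        have := myJoin_mySplit ch.toList
        rw [hab] at this
        simpa [myJoin] using this.symm
      simp only [hab]
      have hfalse : (F.contains a && M.contains b || M.contains a && F.contains b) = false := by
        by_contra hB
        rw [Bool.not_eq_false] at hB
        simp only [Bool.or_eq_true, Bool.and_eq_true] at hB
        apply hc
        apply hmem.mpr
        rcases hB with ⟨ha, hb⟩ | ⟨ha, hb⟩
        · exact ⟨a, List.mem_of_elem_eq_true ha, b, List.mem_of_elem_eq_true hb, Or.inl hch⟩
        · exact ⟨b, List.mem_of_elem_eq_true hb, a, List.mem_of_elem_eq_true ha, Or.inr hch⟩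
      exact hfalse.symm
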